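-- pv_equiv track=rewrite | github.com/amai2222/cp_jq4 | jqc_professional_tool.py | _get_max_consecutive
-- ===== SOURCE A (Python) =====
-- def _get_max_consecutive(bet, target):
--     """获取最大连续次数"""
--     max_len = 0
--     current_len = 0
--
--     for num in bet:
--         if num == target:
--             current_len += 1
--             max_len = max(max_len, current_len)
--         else:
--             current_len = 0
--
--     return max_len
-- ===== SOURCE B (Python) =====
-- def _get_max_consecutive(bet, target):
--     """获取最大连续次数"""
--     best = 0
--     i = 0
--     n = len(bet)
--     while i < n:
--         j = i + 1
--         while j < n and bet[j] == bet[i]: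
--             j += 1
--         if bet[i] == target:
--             best = max(best, j - i)
--         i = j
--     return best
-- ===== Notes on version B (the rewrite author's own statement) =====
-- stated objective: alternative
-- what changed: Replaces A's running-counter-with-reset accumulator by a two-pointer run scan: the outer loop jumps from one maximal run of equal elements to the next, measuring each run with an inner pointer and taking the max over runs whose element equals target.
import Mathlib
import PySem

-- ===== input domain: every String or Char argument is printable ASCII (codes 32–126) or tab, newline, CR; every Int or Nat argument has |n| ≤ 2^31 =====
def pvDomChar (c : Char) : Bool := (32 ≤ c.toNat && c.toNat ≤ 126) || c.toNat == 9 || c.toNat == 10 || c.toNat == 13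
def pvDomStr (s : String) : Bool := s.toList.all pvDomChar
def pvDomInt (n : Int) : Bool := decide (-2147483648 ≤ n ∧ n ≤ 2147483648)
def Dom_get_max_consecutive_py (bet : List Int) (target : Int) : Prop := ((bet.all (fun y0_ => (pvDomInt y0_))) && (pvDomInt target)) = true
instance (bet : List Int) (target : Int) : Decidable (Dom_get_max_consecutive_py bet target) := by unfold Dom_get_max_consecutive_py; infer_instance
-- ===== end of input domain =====

-- B replaces A's running-counter-with-reset accumulator by a two-pointer scan over maximal
-- runs of equal elements (objective: alternative; same O(n) cost).

-- ===== PORT A =====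
-- for num in bet: if num == target: current_len += 1; max_len = max(max_len, current_len)
--                 else: current_len = 0
def get_max_consecutive_py (bet : List Int) (target : Int) : Int :=
  (bet.foldl
    (fun (s : Int × Int) num =>
      if num = target then (max s.1 (s.2 + 1), s.2 + 1) else (s.1, 0))
    (0, 0)).1

-- ===== PORT B =====
-- Source B's outer while-loop advances from one maximal run to the next; each outer iteration is
-- one step of this recursion on the remaining suffix. The inner pointer j measures the run:
-- j - i = 1 + length of the leading block of xs equal to the head (takeWhile), and the next
-- suffix bet[j:] is dropWhile of the same block.
def get_max_consecutive_py_alt (bet : List Int) (target : Int) : Int :=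
  match bet with
  | [] => 0
  | x :: xs =>
      let run : Int := 1 + (xs.takeWhile (· == x)).length
      let rest := get_max_consecutive_py_alt (xs.dropWhile (· == x)) target
      if x = target then max run rest else rest
termination_by bet.length
decreasing_by
  simpa using Nat.lt_succ_of_le (xs.length_dropWhile_le (· == x))

-- ===== PRECONDITION & SPEC =====
def Spec_get_max_consecutive_py (bet : List Int) (target : Int) (out : Int) : Prop := out = get_max_consecutive_py_alt bet target
instance (bet : List Int) (target : Int) (out : Int) : Decidable (Spec_get_max_consecutive_py bet target out) := by unfold Spec_get_max_consecutive_py; infer_instance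

-- ===== CLAIM (what is proved, stated in full; the proofs are below) =====
def Claim_equal_get_max_consecutive_py : Prop := ∀ (bet : List Int) (target : Int), Dom_get_max_consecutive_py bet target → Spec_get_max_consecutive_py bet target (get_max_consecutive_py bet target)

-- ===== LEMMAS AND PROOFS =====

-- length of the leading run of `t` in `l`
def pvLead (l : List Int) (t : Int) : Int :=
  match l with
  | [] => 0
  | x :: xs => if x = t then 1 + pvLead xs t else 0

-- max consecutive `t`s: max over all suffixes of the leading run length
def pvMx (l : List Int) (t : Int) : Int :=
  match l with
  | [] => 0
  | _ :: xs => max (pvLead l t) (pvMx xs t)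

theorem pvLead_nonneg (l : List Int) (t : Int) : 0 ≤ pvLead l t := by
  induction l with
  | nil => simp [pvLead]
  | cons x xs ih => simp only [pvLead]; split <;> omega

theorem pvLead_le_mx (l : List Int) (t : Int) : pvLead l t ≤ pvMx l t := by
  cases l with
  | nil => simp [pvLead, pvMx]
  | cons x xs => simp [pvMx]

theorem pvMx_nonneg (l : List Int) (t : Int) : 0 ≤ pvMx l t := by
  induction l with
  | nil => simp [pvMx]
  | cons x xs ih =>
      have := pvLead_le_mx (x :: xs) t
      simp only [pvMx] at *
      omega

-- A's fold from state (m, c) with 0 ≤ c ≤ m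
theorem pvFoldA (l : List Int) (t : Int) : ∀ (m c : Int), 0 ≤ c → c ≤ m →
    (l.foldl (fun (s : Int × Int) num =>
      if num = t then (max s.1 (s.2 + 1), s.2 + 1) else (s.1, 0)) (m, c)).1
      = max m (max (c + pvLead l t) (pvMx l t)) := by
  induction l with
  | nil =>
      intro m c h0 hm
      simp only [List.foldl, pvLead, pvMx]
      omega
  | cons x xs ih =>
      intro m c h0 hm
      have hlead := pvLead_nonneg xs t
      have hle := pvLead_le_mx xs t
      have hmx := pvMx_nonneg xs t
      by_cases hx : x = t
      · subst hx
        have h1 : (0:Int) ≤ c + 1 := by omega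
        have h2 : c + 1 ≤ max m (c + 1) := le_max_right m (c + 1)
        rw [List.foldl_cons, if_pos rfl, ih (max m (c + 1)) (c + 1) h1 h2]
        simp [pvLead, pvMx]
        omega
      · rw [List.foldl_cons, if_neg hx, ih m 0 le_rfl (le_trans h0 hm)]
        simp only [pvLead, pvMx, if_neg hx]
        omega

theorem pvLead_dropWhile (xs : List Int) (t : Int) :
    pvLead (xs.dropWhile (· == t)) t = 0 := by
  induction xs with
  | nil => simp [pvLead]
  | cons x xs ih =>
      by_cases hx : x = t
      · have hb : (x == t) = true := by simpa using hx
        simpa [List.dropWhile_cons, hb] using ih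
      · simp [pvLead, hx]

theorem pvLead_append_run (l rest : List Int) (t : Int)
    (hall : ∀ y ∈ l, y = t) (hrest : pvLead rest t = 0) :
    pvLead (l ++ rest) t = l.length := by
  induction l with
  | nil => simpa using hrest
  | cons y l' ih =>
      have hy : y = t := hall y (by simp)
      have : ∀ z ∈ l', z = t := fun z hz => hall z (by simp [hz])
      simp only [List.cons_append, pvLead, if_pos hy, ih this, List.length_cons]
      push_cast
      ring

theorem pvMx_append_run (l rest : List Int) (t : Int)
    (hall : ∀ y ∈ l, y = t) (hrest : pvLead rest t = 0) :
    pvMx (l ++ rest) t = max (l.length : Int) (pvMx rest t) := by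
  induction l with
  | nil =>
      have := pvMx_nonneg rest t
      simp only [List.nil_append, List.length_nil, Int.natCast_zero]
      omega
  | cons y l' ih =>
      have hall' : ∀ z ∈ l', z = t := fun z hz => hall z (by simp [hz])
      have hlead := pvLead_append_run l' rest t hall' hrest
      have hy : y = t := hall y (by simp)
      have hmx := pvMx_nonneg rest t
      simp only [List.cons_append, pvMx, pvLead, if_pos hy, hlead, ih hall', List.length_cons]
      push_cast
      omega

theorem pvMx_append_nonrun (l rest : List Int) (t : Int)
    (hall : ∀ y ∈ l, y ≠ t) :
    pvMx (l ++ rest) t = pvMx rest t := by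
  induction l with
  | nil => simp
  | cons y l' ih =>
      have hy : y ≠ t := hall y (by simp)
      have hall' : ∀ z ∈ l', z ≠ t := fun z hz => hall z (by simp [hz])
      simp only [List.cons_append, pvMx, pvLead, if_neg hy, ih hall']
      have := pvMx_nonneg rest t
      omega

theorem pvAlt_eq_mx : ∀ (n : ℕ) (l : List Int) (t : Int), l.length ≤ n →
    get_max_consecutive_py_alt l t = pvMx l t := by
  intro n
  induction n with
  | zero =>
      intro l t hl
      have : l = [] := List.eq_nil_of_length_eq_zero (Nat.le_zero.mp hl)
      subst this
      simp [get_max_consecutive_py_alt, pvMx]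
  | succ n ih =>
      intro l t hl
      cases l with
      | nil => simp [get_max_consecutive_py_alt, pvMx]
      | cons x xs =>
          have hsplit : xs.takeWhile (· == x) ++ xs.dropWhile (· == x) = xs :=
            xs.takeWhile_append_dropWhile
          have hlen : (xs.dropWhile (· == x)).length ≤ n := by
            have := xs.length_dropWhile_le (· == x)
            simp only [List.length_cons] at hl
            omega
          have hallrun : ∀ y ∈ xs.takeWhile (· == x), y = x := by
            intro y hy
            have := List.mem_takeWhile_imp hy
            simpa using this
          rw [get_max_consecutive_py_alt]
          rw [ih (xs.dropWhile (· == x)) t hlen]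
          by_cases hx : x = t
          · subst hx
            have hrest : pvLead (xs.dropWhile (· == x)) x = 0 := pvLead_dropWhile xs x
            have hmxxs : pvMx xs x = max ((xs.takeWhile (· == x)).length : Int)
                (pvMx (xs.dropWhile (· == x)) x) := by
              conv_lhs => rw [← hsplit]
              exact pvMx_append_run _ _ x hallrun hrest
            have hleadxs : pvLead xs x = (xs.takeWhile (· == x)).length := by
              conv_lhs => rw [← hsplit]
              exact pvLead_append_run _ _ x hallrun hrest
            have hnn := pvMx_nonneg (xs.dropWhile (· == x)) x
            simp [pvMx, pvLead, hmxxs, hleadxs]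
            omega
          · have hallne : ∀ y ∈ xs.takeWhile (· == x), y ≠ t := by
              intro y hy
              rw [hallrun y hy]; exact hx
            have hmxxs : pvMx xs t = pvMx (xs.dropWhile (· == x)) t := by
              conv_lhs => rw [← hsplit]
              exact pvMx_append_nonrun _ _ t hallne
            have hnn := pvMx_nonneg (xs.dropWhile (· == x)) t
            simp [pvMx, pvLead, hx, hmxxs]
            omega

-- ===== VERDICT (by name: the statement is the Claim_ definition above) =====
theorem get_max_consecutive_py_spec : Claim_equal_get_max_consecutive_py := by
  intro bet target _
  unfold Spec_get_max_consecutive_py get_max_consecutive_py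
  rw [pvFoldA bet target 0 0 le_rfl le_rfl,
      pvAlt_eq_mx bet.length bet target le_rfl]
  have h1 := pvLead_le_mx bet target
  have h2 := pvMx_nonneg bet target
  omega
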